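-- pv_equiv track=rewrite | github.com/dsweet99/dryer | tests/benchmark_data/module_014.py | compute_14_2
-- ===== SOURCE A (Python) =====
-- def compute_14_2(a, b, c):
--     x = a * 245 + b * 198
--     y = c * 167 - a * 124
--     for i in range(21):
--         x = x + i * 45
--         y = y - i * 19
--         if x > 6420:
--             x = x % 1710
--     return x + y + 29
-- ===== SOURCE B (Python) =====
-- def compute_14_2(a, b, c):
--     # y series folded into a closed-form constant (sum i*19 over range(21) = 3990);
--     # the x update is expressed as structural recursion over a precomputed increment list.
--     def run(x, incs):
--         if not incs:
--             return x
--         x += incs[0]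
--         if x > 6420:
--             x %= 1710
--         return run(x, incs[1:])
--     x = run(a * 245 + b * 198, [45 * i for i in range(21)])
--     return x + (c * 167 - a * 124 - 3990) + 29
-- ===== Notes on version B (the rewrite author's own statement) =====
-- stated objective: alternative
-- what changed: The y accumulation is replaced by the closed-form constant 3990, and the x loop becomes structural recursion over a precomputed list of increments [45*i for i in range(21)] instead of an indexed loop updating two variables.
import Mathlib
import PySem

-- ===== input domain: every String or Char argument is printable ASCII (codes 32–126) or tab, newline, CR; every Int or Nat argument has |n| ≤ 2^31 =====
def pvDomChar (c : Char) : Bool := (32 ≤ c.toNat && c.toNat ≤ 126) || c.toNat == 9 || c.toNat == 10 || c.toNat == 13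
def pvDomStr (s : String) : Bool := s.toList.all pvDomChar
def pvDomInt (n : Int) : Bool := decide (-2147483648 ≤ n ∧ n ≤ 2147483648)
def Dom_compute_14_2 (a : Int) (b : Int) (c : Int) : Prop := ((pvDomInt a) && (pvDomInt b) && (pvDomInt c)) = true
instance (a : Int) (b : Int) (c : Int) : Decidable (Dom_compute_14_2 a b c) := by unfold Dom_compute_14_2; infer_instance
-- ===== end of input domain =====

-- B folds the y accumulation into the constant 3990 and replaces the indexed two-variable
-- loop by structural recursion over a precomputed increment list; objective: alternative.

-- ===== PORT A =====
def compute_14_2 (a : Int) (b : Int) (c : Int) : Int :=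
  let x := a * 245 + b * 198
  let y := c * 167 - a * 124
  let p := (PySem.List.pyRange 0 21 1).foldl
    (fun (s : Int × Int) (i : Int) =>
      let x := s.1 + i * 45
      let y := s.2 - i * 19
      let x := if x > 6420 then PySem.Int.mod x 1710 else x
      (x, y)) (x, y)
  p.1 + p.2 + 29

-- ===== PORT B =====
-- structural recursion of Source B's `run` helper
def pvRun : Int → List Int → Int
  | x, [] => x
  | x, h :: t =>
      let x := x + h
      if x > 6420 then pvRun (PySem.Int.mod x 1710) t else pvRun x t

def compute_14_2_alt (a : Int) (b : Int) (c : Int) : Int :=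
  let incs := (List.range 21).map (fun i => 45 * (i : Int))
  let x := pvRun (a * 245 + b * 198) incs
  x + (c * 167 - a * 124 - 3990) + 29

-- ===== PRECONDITION & SPEC =====
def Spec_compute_14_2 (a : Int) (b : Int) (c : Int) (out : Int) : Prop := out = compute_14_2_alt a b c
instance (a : Int) (b : Int) (c : Int) (out : Int) : Decidable (Spec_compute_14_2 a b c out) := by unfold Spec_compute_14_2; infer_instance

-- ===== CLAIM (what is proved, stated in full; the proofs are below) =====
def Claim_equal_compute_14_2 : Prop := ∀ (a : Int) (b : Int) (c : Int), Dom_compute_14_2 a b c → Spec_compute_14_2 a b c (compute_14_2 a b c)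

-- ===== LEMMAS AND PROOFS =====

-- A's paired fold over indices l equals (B's recursion over the scaled increments, y - 19·Σ l).
theorem pv_fold_split (l : List Int) (x y : Int) :
    (l.foldl (fun (s : Int × Int) (i : Int) =>
        let x := s.1 + i * 45
        let y := s.2 - i * 19
        let x := if x > 6420 then PySem.Int.mod x 1710 else x
        (x, y)) (x, y))
    = (pvRun x (l.map (fun i => 45 * i)), y - 19 * l.sum) := by
  induction l generalizing x y with
  | nil => simp [pvRun]
  | cons i l ih =>
    simp only [List.foldl_cons, List.sum_cons, List.map_cons, pvRun]
    have hx : x + i * 45 = x + 45 * i := by ring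
    rw [hx] at *
    split_ifs with h
    · simp only [ih]; rw [Prod.mk.injEq]; exact ⟨rfl, by ring⟩
    · simp only [ih]; rw [Prod.mk.injEq]; exact ⟨rfl, by ring⟩

theorem compute_14_2_eq (a b c : Int) : compute_14_2 a b c = compute_14_2_alt a b c := by
  simp only [compute_14_2, compute_14_2_alt]
  rw [pv_fold_split]
  have h1 : (PySem.List.pyRange 0 21 1).map (fun i => 45 * i)
      = (List.range 21).map (fun i => 45 * (i : Int)) := by decide
  have h2 : (PySem.List.pyRange 0 21 1).sum = 210 := by decide
  rw [h1, h2]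
  ring

-- ===== VERDICT (by name: the statement is the Claim_ definition above) =====
theorem compute_14_2_spec : Claim_equal_compute_14_2 := by
  intro a b c _
  exact compute_14_2_eq a b c
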